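-- pv_equiv track=rewrite | github.com/johnmathewii/BuildingAICodesPY | Advanced/Exercise7code2.py | count
-- ===== SOURCE A (Python) =====
-- def count(seq):
--     outerCount = 0
--     for i in range(0, len(seq)-1):
--         innerCount = 5
--         while (seq[i] == 1):
--             innerCount = innerCount - 1
--             if innerCount == 0:
--                 outerCount = outerCount + 1
--                 break
--             else:
--                 i = i + 1
--                 if i == len(seq):
--                     break
--                 continue
--     return outerCount
-- ===== SOURCE B (Python) =====
-- def count(seq):
--     total = 0
--     run = 0
--     for x in seq:
--         if x == 1:
--             run += 1
--             if run >= 5: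
--                 total += 1
--         else:
--             run = 0
--     return total
-- ===== Notes on version B (the rewrite author's own statement) =====
-- stated objective: simpler
-- what changed: Replaces A's per-start-index inner while-scan over each candidate window with one linear pass maintaining the current run length of consecutive ones, counting a window whenever the run reaches 5.
import Mathlib
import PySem

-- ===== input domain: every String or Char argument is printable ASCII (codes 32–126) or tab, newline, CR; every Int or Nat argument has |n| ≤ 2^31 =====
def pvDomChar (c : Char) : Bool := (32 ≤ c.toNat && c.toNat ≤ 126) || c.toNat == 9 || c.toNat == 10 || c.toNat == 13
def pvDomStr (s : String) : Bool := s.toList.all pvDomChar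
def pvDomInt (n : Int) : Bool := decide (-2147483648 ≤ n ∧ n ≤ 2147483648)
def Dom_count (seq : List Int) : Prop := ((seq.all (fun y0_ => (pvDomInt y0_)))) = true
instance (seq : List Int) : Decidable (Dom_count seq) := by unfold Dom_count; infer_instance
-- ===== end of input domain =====

-- B replaces A's per-start-index inner while-scan with one linear pass keeping the current run length of ones (objective: simpler).

-- ===== PORT A =====
-- the while-loop body: state (i, innerCount, outerCount); innerCount strictly decreases, so we recurse on it
def countInner (seq : List Int) (i : Int) (k : Nat) (outer : Int) : Int :=
  match k with
  | 0 => outer        -- unreachable: the loop breaks when innerCount hits 0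
  | k' + 1 =>
    if PySem.List.pyGet? seq i = some 1 then         -- while seq[i] == 1
      -- innerCount = innerCount - 1  (now k')
      if k' = 0 then outer + 1                       -- outerCount += 1; break
      else if i + 1 = (seq.length : Int) then outer  -- i += 1; if i == len(seq): break
      else countInner seq (i + 1) k' outer           -- continue
    else outer

def count (seq : List Int) : Int :=
  (PySem.List.pyRange 0 ((seq.length : Int) - 1) 1).foldl
    (fun outerCount i => countInner seq i 5 outerCount) 0

-- ===== PORT B =====
def count_alt (seq : List Int) : Int :=
  (seq.foldl
    (fun (s : Int × Int) x =>
      if x = 1 then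
        (if s.2 + 1 ≥ 5 then s.1 + 1 else s.1, s.2 + 1)
      else (s.1, 0))
    (0, 0)).1

-- ===== PRECONDITION & SPEC =====
def Spec_count (seq : List Int) (out : Int) : Prop := out = count_alt seq
instance (seq : List Int) (out : Int) : Decidable (Spec_count seq out) := by unfold Spec_count; infer_instance

-- ===== CLAIM (what is proved, stated in full; the proofs are below) =====
def Claim_equal_count : Prop := ∀ (seq : List Int), Dom_count seq → Spec_count seq (count seq)

-- ===== LEMMAS AND PROOFS =====

-- number of positions starting five consecutive ones, by head recursion (the common spec)
def pvW : List Int → Int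
  | [] => 0
  | x :: l => (if (x :: l).take 5 = List.replicate 5 (1:Int) then 1 else 0) + pvW l

lemma pvW_cons (x : Int) (l : List Int) :
    pvW (x :: l) = (if (x :: l).take 5 = List.replicate 5 (1:Int) then 1 else 0) + pvW l := rfl

-- window indicator at natural start position
def pvF (seq : List Int) (n : Nat) : Int :=
  if (seq.drop n).take 5 = List.replicate 5 (1:Int) then 1 else 0

lemma countInner_eq (seq : List Int) (k : Nat) (hk : 1 ≤ k) (n : Nat) (outer : Int) :
    countInner seq (↑n) k outer =
      outer + (if (seq.drop n).take k = List.replicate k (1:Int) then 1 else 0) := by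
  induction k generalizing n with
  | zero => omega
  | succ k' ih =>
    simp only [countInner]
    by_cases hget : PySem.List.pyGet? seq (↑n : Int) = some 1
    · rw [if_pos hget]
      rw [PySem.List.pyGet?_natCast] at hget
      obtain ⟨hlt, hv⟩ := List.getElem?_eq_some_iff.mp hget
      have hdrop : seq.drop n = 1 :: seq.drop (n + 1) := by
        rw [← hv]; exact (List.getElem_cons_drop hlt).symm
      by_cases hk0 : k' = 0
      · subst hk0
        simp [hdrop]
      · rw [if_neg hk0]
        by_cases hend : (↑n : Int) + 1 = (seq.length : Int)
        · rw [if_pos hend]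
          have hnn : n + 1 = seq.length := by exact_mod_cast hend
          have hnil : seq.drop (n + 1) = [] := by simp [hnn]
          rw [hdrop, hnil]
          have hne : ¬ (List.take (k' + 1) [(1:Int)] = List.replicate (k' + 1) (1:Int)) := by
            intro h
            have hlen := congrArg List.length h
            simp at hlen
            omega
          rw [if_neg hne]; ring
        · rw [if_neg hend]
          have hcast : (↑n : Int) + 1 = ((n + 1 : Nat) : Int) := by push_cast; ring
          rw [hcast, ih (by omega) (n + 1)]
          rw [hdrop]
          simp [List.replicate_succ]
    · rw [if_neg hget]
      rw [PySem.List.pyGet?_natCast] at hget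
      have hne : ¬ (List.take (k' + 1) (seq.drop n) = List.replicate (k' + 1) (1:Int)) := by
        intro h
        by_cases hlt : n < seq.length
        · have hdrop : seq.drop n = seq[n] :: seq.drop (n + 1) := (List.getElem_cons_drop hlt).symm
          simp only [hdrop, List.take_succ_cons, List.replicate_succ, List.cons.injEq] at h
          exact hget (by rw [List.getElem?_eq_some_iff]; exact ⟨hlt, h.1⟩)
        · have hnil : seq.drop n = [] := List.drop_eq_nil_of_le (by omega)
          rw [hnil] at h
          have := congrArg List.length h
          simp at this
      rw [if_neg hne]; ring

lemma pvW_eq_sum (seq : List Int) :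
    pvW seq = ((List.range seq.length).map (pvF seq)).sum := by
  induction seq with
  | nil => simp [pvW]
  | cons x l ih =>
    have hmap : (List.range l.length).map (pvF (x :: l) ∘ Nat.succ)
        = (List.range l.length).map (pvF l) := by
      apply List.map_congr_left
      intro n _
      simp [pvF, Function.comp]
    rw [pvW, ih, List.length_cons, List.range_succ_eq_map, List.map_cons, List.map_map, hmap,
      List.sum_cons]
    rfl

lemma count_eq_pvW (seq : List Int) : count seq = pvW seq := by
  unfold count
  rw [PySem.List.pyRange_one]
  have hcast : ((seq.length : Int) - 1 - 0).toNat = seq.length - 1 := by omega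
  rw [hcast, List.foldl_map]
  have hfold : ∀ (ns : List Nat) (init : Int),
      ns.foldl (fun outer n => countInner seq ((0:Int) + ↑n) 5 outer) init
        = init + (ns.map (pvF seq)).sum := by
    intro ns
    induction ns with
    | nil => intro init; simp
    | cons n t iht =>
      intro init
      simp only [List.foldl_cons, List.map_cons, List.sum_cons]
      rw [iht]
      have h0 : ((0:Int) + ↑n) = (↑n : Int) := by ring
      rw [h0, countInner_eq seq 5 (by omega) n init]
      show init + pvF seq n + _ = _
      ring
  rw [hfold, pvW_eq_sum]
  rcases Nat.eq_zero_or_pos seq.length with h0 | hpos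
  · simp [h0]
  · have hlen : seq.length = (seq.length - 1) + 1 := by omega
    rw [hlen, List.range_succ, List.map_append, List.sum_append]
    have hlast : pvF seq (seq.length - 1) = 0 := by
      unfold pvF
      rw [if_neg]
      intro h
      have := congrArg List.length h
      simp at this
      omega
    simp [hlast]

-- the carried run: what B's loop adds to the total when started with run length `run`
def pvG (run : Int) : List Int → Int
  | [] => 0
  | x :: l => if x = 1 then (if run + 1 ≥ 5 then 1 else 0) + pvG (run + 1) l else pvG 0 l

lemma foldl_fst_eq (seq : List Int) (total run : Int) :
    (seq.foldl
      (fun (s : Int × Int) x =>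
        if x = 1 then
          (if s.2 + 1 ≥ 5 then s.1 + 1 else s.1, s.2 + 1)
        else (s.1, 0))
      (total, run)).1 = total + pvG run seq := by
  induction seq generalizing total run with
  | nil => simp [pvG]
  | cons x l ih =>
    simp only [List.foldl_cons, pvG]
    by_cases hx : x = 1
    · rw [if_pos hx, if_pos hx]
      by_cases h5 : run + 1 ≥ 5
      · rw [if_pos h5, if_pos h5, ih]; ring
      · rw [if_neg h5, if_neg h5, ih]; ring
    · rw [if_neg hx, if_neg hx, ih]

lemma take5_ne (l : List Int) (j : Nat) (hj : j < 5) (x : Int) (hx : x ≠ 1)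
    (h : l[j]? = some x) : ¬ (l.take 5 = List.replicate 5 (1:Int)) := by
  intro h5
  have h1 : (l.take 5)[j]? = some x := by
    rw [List.getElem?_take_of_lt hj]; exact h
  rw [h5] at h1
  have hmem : x ∈ List.replicate 5 (1:Int) := List.mem_of_getElem? h1
  exact hx (List.eq_of_mem_replicate hmem)

lemma pvW_replicate (r : Nat) (hr : r ≤ 4) : pvW (List.replicate r (1:Int)) = 0 := by
  interval_cases r <;> decide

lemma pvW_ones_prefix : ∀ (r : Nat), r ≤ 4 → ∀ (x : Int), x ≠ 1 → ∀ (l : List Int),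
    pvW (List.replicate r (1:Int) ++ x :: l) = pvW (x :: l) := by
  intro r
  induction r with
  | zero => intro _ x _ l; simp
  | succ r ih =>
    intro hr x hx l
    have hsplit : List.replicate (r + 1) (1:Int) ++ x :: l
        = 1 :: (List.replicate r (1:Int) ++ x :: l) := by
      simp [List.replicate_succ]
    rw [hsplit, pvW_cons, if_neg, zero_add, ih (by omega) x hx l]
    apply take5_ne _ (r + 1) (by omega) x hx
    simp

lemma pvW_cons_ne (x : Int) (t : List Int) (hx : x ≠ 1) : pvW (x :: t) = pvW t := by
  rw [pvW_cons, if_neg (take5_ne _ 0 (by omega) x hx rfl), zero_add]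

lemma pvG_eq_pvW (l : List Int) : ∀ (run : Int), 0 ≤ run →
    pvG run l = pvW (List.replicate (min run.toNat 4) (1:Int) ++ l) := by
  induction l with
  | nil => intro run _; simp [pvG, pvW_replicate (min run.toNat 4) (by omega)]
  | cons x t ih =>
    intro run hrun
    rw [pvG]
    by_cases hx : x = 1
    · rw [if_pos hx, hx]
      by_cases h5 : run + 1 ≥ 5
      · rw [if_pos h5]
        have hmin : min run.toNat 4 = 4 := by omega
        have hmin' : min (run + 1).toNat 4 = 4 := by omega
        have hrep4 : List.replicate 4 (1:Int) = [1, 1, 1, 1] := rfl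
        rw [ih (run + 1) (by omega), hmin, hmin', hrep4]
        simp only [List.cons_append, List.nil_append]
        conv_rhs => rw [pvW_cons]
        rw [if_pos (show List.take 5 ((1:Int) :: 1 :: 1 :: 1 :: 1 :: t)
              = List.replicate 5 (1:Int) from rfl)]
      · rw [if_neg h5]
        have hmin' : min (run + 1).toNat 4 = min run.toNat 4 + 1 := by omega
        rw [ih (run + 1) (by omega), hmin', List.replicate_succ']
        simp [List.append_assoc]
    · rw [if_neg hx, ih 0 le_rfl]
      simp only [Int.toNat_zero, Nat.zero_min, List.replicate_zero, List.nil_append]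
      rw [pvW_ones_prefix (min run.toNat 4) (by omega) x hx t, pvW_cons_ne x t hx]

lemma count_alt_eq_pvW (seq : List Int) : count_alt seq = pvW seq := by
  unfold count_alt
  rw [foldl_fst_eq, pvG_eq_pvW seq 0 le_rfl]
  simp

-- ===== VERDICT (by name: the statement is the Claim_ definition above) =====
theorem count_spec : Claim_equal_count := by
  intro seq _
  unfold Spec_count
  rw [count_eq_pvW, count_alt_eq_pvW]
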